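-- pv_equiv track=rewrite | github.com/notrealsilk/Algorithm | SWEA/3143/3143.py | Brute_Ag
-- ===== SOURCE A (Python) =====
-- def Brute_Ag(A,B):
--     i = 0 # A의 인덱스
--     N = len(A)
--     M = len(B)
--     typing = 0 # 타이핑 횟수 (결과물)
--
--     while i < N : # 문자열 A 길이만큼 순회
--
--         # A, B가 겹치는 곳
--         # 문자열이므로 슬라이싱으로 접근
--         if A[i:i+M] == B :
--             typing += 1
--             i += M # 겹치는 곳은 B의 길이만큼 건너뜀
--
--         # A,B가 겹치지 않는 곳
--         else:
--             typing += 1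
--             i += 1 # A에서 한 문자 옆으로 이동
--
--     return typing
-- ===== SOURCE B (Python) =====
-- def Brute_Ag(A, B):
--     N, M = len(A), len(B)
--     if M == 0:
--         return N
--     count = 0
--     i = 0
--     while True:
--         j = A.find(B, i)
--         if j == -1:
--             break
--         count += 1
--         i = j + M
--     return N - (M - 1) * count
-- ===== Notes on version B (the rewrite author's own statement) =====
-- stated objective: faster
-- what changed: Replaces A's per-character scan that slices and compares A[i:i+M] against B at every index with a str.find jump loop that locates each greedy non-overlapping occurrence directly and returns the closed form N-(M-1)*count.
import Mathlib
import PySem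

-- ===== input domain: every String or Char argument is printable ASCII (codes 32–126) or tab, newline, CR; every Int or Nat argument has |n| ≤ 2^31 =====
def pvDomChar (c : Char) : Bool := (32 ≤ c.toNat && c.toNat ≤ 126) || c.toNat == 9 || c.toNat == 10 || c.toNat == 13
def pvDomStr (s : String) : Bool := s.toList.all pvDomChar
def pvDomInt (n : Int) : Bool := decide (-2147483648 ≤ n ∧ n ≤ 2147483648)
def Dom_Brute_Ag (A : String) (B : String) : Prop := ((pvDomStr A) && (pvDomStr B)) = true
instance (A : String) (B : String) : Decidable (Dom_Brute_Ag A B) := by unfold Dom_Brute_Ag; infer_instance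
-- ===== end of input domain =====

-- B replaces A's char-by-char scan with str.find jumps plus the closed form N-(M-1)*count; equivalence is on the return value.

-- ===== PORT A =====
-- the while loop of A; fuel is only a totality guard (each iteration advances i by ≥ 1 when B ≠ "";
-- for B = "" and A ≠ "" the Python loop never returns, excluded by Pre_)
def bruteLoop (l b : List Char) (fuel : Nat) (i : Nat) (typing : Int) : Int :=
  match fuel with
  | 0 => typing
  | f + 1 =>
    if i < l.length then
      if PySem.List.slice l (some (i : Int)) (some ((i : Int) + (b.length : Int))) = b then
        bruteLoop l b f (i + b.length) (typing + 1)
      else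
        bruteLoop l b f (i + 1) (typing + 1)
    else typing

def Brute_Ag (A : String) (B : String) : Int :=
  bruteLoop A.toList B.toList (A.toList.length + 1) 0 0

-- ===== PORT B =====
-- the find-jump loop of Source B; fuel is only a totality guard (i advances by ≥ 1 per iteration since b ≠ [] here)
def altLoop (l b : List Char) (fuel : Nat) (i : Nat) (count : Int) : Int :=
  match fuel with
  | 0 => count
  | f + 1 =>
    let j := PySem.Chars.findFrom l b ((i : Int)) none
    if j = -1 then count
    else altLoop l b f (j.toNat + b.length) (count + 1)

def Brute_Ag_alt (A : String) (B : String) : Int :=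
  if B.toList.length = 0 then (A.toList.length : Int)
  else (A.toList.length : Int)
       - ((B.toList.length : Int) - 1) * altLoop A.toList B.toList (A.toList.length + 1) 0 0

-- ===== PRECONDITION & SPEC =====
-- Pre_ excludes only B = "" with A ≠ "": there Python A's loop never terminates (i += 0), so A returns no value.
def Pre_Brute_Ag (A : String) (B : String) : Prop := B ≠ "" ∨ A = ""
instance (A : String) (B : String) : Decidable (Pre_Brute_Ag A B) := by unfold Pre_Brute_Ag; infer_instance
def pvWitness_Brute_Ag : String × String := ("ababa", "ab")

def Spec_Brute_Ag (A : String) (B : String) (out : Int) : Prop := out = Brute_Ag_alt A B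
instance (A : String) (B : String) (out : Int) : Decidable (Spec_Brute_Ag A B out) := by unfold Spec_Brute_Ag; infer_instance

-- ===== CLAIM (what is proved, stated in full; the proofs are below) =====
def Claim_equal_Brute_Ag : Prop := ∀ (A : String) (B : String), Dom_Brute_Ag A B → Pre_Brute_Ag A B → Spec_Brute_Ag A B (Brute_Ag A B)

-- ===== LEMMAS AND PROOFS =====

-- canonical greedy count of non-overlapping occurrences of bh::bt, scanning left to right
def gcount (bh : Char) (bt : List Char) : List Char → Nat
  | [] => 0
  | c :: s =>
    if (bh :: bt) <+: (c :: s) then 1 + gcount bh bt (s.drop bt.length)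
    else gcount bh bt s
termination_by s => s.length
decreasing_by
  · exact Nat.lt_succ_of_le (by simp)
  · simp

lemma gcount_zero (bh : Char) (bt : List Char) (x : List Char)
    (h : ∀ j, ¬ (bh :: bt) <+: x.drop j) : gcount bh bt x = 0 := by
  induction x with
  | nil => simp [gcount]
  | cons c s ih =>
    rw [gcount]
    rw [if_neg (by simpa using h 0)]
    exact ih (fun j => by simpa using h (j + 1))

lemma gcount_first (bh : Char) (bt : List Char) :
    ∀ (p : Nat) (x : List Char), (bh :: bt) <+: x.drop p →
      (∀ j < p, ¬ (bh :: bt) <+: x.drop j) →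
      gcount bh bt x = 1 + gcount bh bt (x.drop (p + bt.length + 1)) := by
  intro p
  induction p with
  | zero =>
    intro x hp _
    simp only [List.drop_zero] at hp
    obtain ⟨t, ht⟩ := hp
    subst ht
    simp only [List.cons_append]
    rw [gcount, if_pos (by exact ⟨t, by simp⟩)]
    congr 1
    simp
  | succ p ih =>
    intro x hp hmin
    match x with
    | [] => simp at hp
    | c :: s =>
      rw [gcount]
      rw [if_neg (by simpa using hmin 0 (Nat.succ_pos p))]
      have := ih s (by simpa using hp) (fun j hj => by simpa using hmin (j + 1) (by omega))
      simpa [Nat.add_right_comm] using this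

lemma prefix_take_iff (b x : List Char) : x.take b.length = b ↔ b <+: x := by
  constructor
  · intro h; exact h ▸ List.take_prefix _ _
  · intro h; obtain ⟨t, ht⟩ := h; subst ht; simp

lemma infix_iff_prefix_drop (b x : List Char) : b <:+: x ↔ ∃ j, b <+: x.drop j := by
  constructor
  · intro h
    obtain ⟨t, hpre, hsuf⟩ := List.infix_iff_prefix_suffix.mp h
    obtain ⟨u, hu⟩ := hsuf
    exact ⟨u.length, by rw [← hu]; simpa using hpre⟩
  · rintro ⟨j, hj⟩
    exact hj.isInfix.trans (List.drop_suffix j x).isInfix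

-- A's loop computes typing + (N - i) - (M-1) * gcount on the remaining suffix
lemma bruteLoop_eq (l : List Char) (bh : Char) (bt : List Char) :
    ∀ (fuel i : Nat) (typing : Int), l.length ≤ i + fuel → i ≤ l.length →
      bruteLoop l (bh :: bt) fuel i typing
        = typing + ((l.length - i : Nat) : Int)
          - (bt.length : Int) * (gcount bh bt (l.drop i) : Int) := by
  intro fuel
  induction fuel with
  | zero =>
    intro i typing hf hi
    have : i = l.length := by omega
    subst this
    have h0 : gcount bh bt ([] : List Char) = 0 :=
      gcount_zero bh bt _ (fun j => by simp)
    simp [bruteLoop, h0]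
  | succ f ih =>
    intro i typing hf hi
    rw [bruteLoop]
    by_cases hlt : i < l.length
    · rw [if_pos hlt]
      have hslice : PySem.List.slice l (some (i : Int)) (some ((i : Int) + ((bh :: bt).length : Int)))
          = (l.drop i).take (bh :: bt).length := by
        exact_mod_cast PySem.List.slice_natCast_add l i (bh :: bt).length
      by_cases hmatch : (bh :: bt) <+: l.drop i
      · rw [if_pos (by rw [hslice]; exact (prefix_take_iff _ _).mpr hmatch)]
        have hlen : (bh :: bt).length ≤ (l.drop i).length := hmatch.length_le
        simp only [List.length_cons, List.length_drop] at hlen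
        rw [ih (i + (bh :: bt).length) (typing + 1)
              (by simp only [List.length_cons] at *; omega)
              (by simp only [List.length_cons] at *; omega)]
        have hg : gcount bh bt (l.drop i) = 1 + gcount bh bt (l.drop (i + (bh :: bt).length)) := by
          have := gcount_first bh bt 0 (l.drop i) (by simpa using hmatch) (by omega)
          simpa [List.drop_drop, Nat.add_comm, Nat.add_left_comm, Nat.add_assoc] using this
        rw [hg]
        push_cast
        have : ((bh :: bt).length : Int) = (bt.length : Int) + 1 := by push_cast [List.length_cons]; ring
        simp only [List.length_cons] at *
        rw [Int.mul_add, Int.mul_one]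
        omega
      · rw [if_neg (by rw [hslice]; exact fun h => hmatch ((prefix_take_iff _ _).mp h))]
        rw [ih (i + 1) (typing + 1) (by omega) (by omega)]
        have hg : gcount bh bt (l.drop i) = gcount bh bt (l.drop (i + 1)) := by
          obtain ⟨c, s, hcs⟩ : ∃ c s, l.drop i = c :: s := by
            cases h : l.drop i with
            | nil =>
              have := congrArg List.length h
              simp only [List.length_drop, List.length_nil] at this
              omega
            | cons c s => exact ⟨c, s, rfl⟩
          have hstep : l.drop (i + 1) = s := by
            have h1 : l.drop (i + 1) = (l.drop i).tail := by
              rw [← List.drop_one, List.drop_drop, Nat.add_comm]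
            rw [h1, hcs, List.tail_cons]
          rw [hcs, hstep, gcount, if_neg (hcs ▸ hmatch)]
        rw [hg]
        omega
    · rw [if_neg hlt]
      have : i = l.length := by omega
      subst this
      have h0 : gcount bh bt ([] : List Char) = 0 :=
        gcount_zero bh bt _ (fun j => by simp)
      simp [h0]

-- B's loop counts the greedy matches: altLoop = count + gcount on the remaining suffix
lemma altLoop_eq (l : List Char) (bh : Char) (bt : List Char) :
    ∀ (fuel i : Nat) (count : Int), l.length < i + fuel → i ≤ l.length →
      altLoop l (bh :: bt) fuel i count = count + (gcount bh bt (l.drop i) : Int) := by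
  intro fuel
  induction fuel with
  | zero => intro i count hf hi; omega
  | succ f ih =>
    intro i count hf hi
    rw [altLoop]
    rw [PySem.Chars.findFrom_natCast l (bh :: bt) i hi]
    by_cases hfind : PySem.Chars.find (l.drop i) (bh :: bt) = -1
    · rw [if_pos (by rw [if_pos hfind])]
      have hnone : ¬ (bh :: bt) <:+: l.drop i := (PySem.Chars.find_eq_neg_one_iff _ _).mp hfind
      rw [gcount_zero bh bt _ (fun j h => hnone ((infix_iff_prefix_drop _ _).mpr
            ⟨j, by simpa [List.drop_drop] using h⟩))]
      simp
    · have hpos : 0 ≤ PySem.Chars.find (l.drop i) (bh :: bt) := by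
        have := PySem.Chars.neg_one_le_find (l.drop i) (bh :: bt); omega
      set p := PySem.Chars.find (l.drop i) (bh :: bt) with hp
      have hspec := PySem.Chars.find_spec hpos
      rw [← hp] at hspec
      rw [if_neg hfind]
      rw [if_neg (by omega)]
      have htoNat : ((i : Int) + p).toNat = i + p.toNat := by omega
      have hpre : (bh :: bt) <+: l.drop (i + p.toNat) := by
        have h1 := hspec.1
        rwa [List.drop_drop] at h1
      have hlen : (bh :: bt).length ≤ (l.drop (i + p.toNat)).length := hpre.length_le
      simp only [List.length_cons, List.length_drop] at hlen
      rw [htoNat]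
      rw [ih (i + p.toNat + (bh :: bt).length) (count + 1)
            (by simp only [List.length_cons] at *; omega)
            (by simp only [List.length_cons] at *; omega)]
      have hg : gcount bh bt (l.drop i) = 1 + gcount bh bt (l.drop (i + p.toNat + (bh :: bt).length)) := by
        have hmin : ∀ j < p.toNat, ¬ (bh :: bt) <+: (l.drop i).drop j := hspec.2
        have := gcount_first bh bt p.toNat (l.drop i)
            (by rw [List.drop_drop]; exact hpre)
            hmin
        rw [this, List.drop_drop]
        congr 2
        simp [List.length_cons]
        omega
      rw [hg]
      push_cast
      ring

lemma main_eq (A B : String) (h : Pre_Brute_Ag A B) : Brute_Ag A B = Brute_Ag_alt A B := by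
  rcases h with hB | hA
  · -- B ≠ ""
    obtain ⟨bh, bt, hb⟩ : ∃ bh bt, B.toList = bh :: bt := by
      cases h : B.toList with
      | nil => exact absurd (by rwa [String.toList_eq_nil_iff] at h) hB
      | cons c s => exact ⟨c, s, rfl⟩
    unfold Brute_Ag Brute_Ag_alt
    rw [hb]
    rw [bruteLoop_eq A.toList bh bt (A.toList.length + 1) 0 0 (by omega) (by omega)]
    rw [if_neg (by simp)]
    rw [altLoop_eq A.toList bh bt (A.toList.length + 1) 0 0 (by omega) (by omega)]
    push_cast [List.length_cons]
    ring_nf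
    omega
  · -- A = ""
    subst hA
    have hA0 : ("" : String).toList = ([] : List Char) := rfl
    unfold Brute_Ag Brute_Ag_alt
    rw [hA0]
    by_cases hb : B.toList.length = 0
    · simp [bruteLoop, hb]
    · rw [if_neg hb]
      obtain ⟨c, s, hBc⟩ : ∃ c s, B.toList = c :: s := by
        cases h : B.toList with
        | nil => rw [h] at hb; simp at hb
        | cons c s => exact ⟨c, s, rfl⟩
      rw [hBc, altLoop_eq [] c s (List.length ([] : List Char) + 1) 0 0 (by simp) (by simp)]
      simp [bruteLoop, gcount]

-- ===== VERDICT (by name: the statement is the Claim_ definition above) =====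
theorem Brute_Ag_spec : Claim_equal_Brute_Ag := by
  intro A B _ hpre
  exact main_eq A B hpre
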